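-- pv_equiv track=rewrite | github.com/vatlab/sos | src/sos/workflow_engines.py | remove_arg
-- ===== SOURCE A (Python) =====
-- def remove_arg(argv, arg):
--     r_idx = [idx for idx, x in enumerate(argv) if x.startswith(arg)]
--     if not r_idx:
--         return argv
--     else:
--         r_idx = r_idx[0]
--     # find next option
--     r_next = [
--         idx for idx, x in enumerate(argv[r_idx + 1:]) if x.startswith("-")
--     ]
--     if r_next:
--         argv = argv[:r_idx] + argv[r_idx + 1 + r_next[0]:]
--     else:
--         argv = argv[:r_idx]
--     return argv
-- ===== SOURCE B (Python) =====
-- def remove_arg(argv, arg):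
--     # single forward pass: copy until first element starting with arg, then
--     # skip until the next element starting with '-' (kept), then copy the rest
--     out = []
--     it = iter(argv)
--     for x in it:
--         if x.startswith(arg):
--             for y in it:
--                 if y.startswith("-"):
--                     out.append(y)
--                     out.extend(it)
--                     break
--             return out
--         out.append(x)
--     return argv
-- ===== Notes on version B (the rewrite author's own statement) =====
-- stated objective: alternative
-- what changed: A builds two full index lists via enumerate and reassembles the result from slices; B is a single forward pass with a copy/skip state machine that stops scanning as soon as the next option is found.
import Mathlib
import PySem

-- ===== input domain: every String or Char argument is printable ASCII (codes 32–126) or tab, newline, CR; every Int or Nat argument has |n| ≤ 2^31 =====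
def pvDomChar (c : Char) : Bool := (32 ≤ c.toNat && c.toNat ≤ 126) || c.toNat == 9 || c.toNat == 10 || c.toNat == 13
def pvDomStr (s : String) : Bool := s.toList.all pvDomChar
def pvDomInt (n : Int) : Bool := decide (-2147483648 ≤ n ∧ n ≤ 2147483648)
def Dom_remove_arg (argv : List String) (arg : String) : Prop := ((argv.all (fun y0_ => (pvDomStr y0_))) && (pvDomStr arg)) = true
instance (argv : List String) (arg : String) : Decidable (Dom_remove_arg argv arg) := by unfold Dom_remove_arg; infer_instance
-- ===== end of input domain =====

-- B replaces A's two enumerate-built index lists and slice reassembly with a single forward pass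
-- (copy, then skip after the first match until the next '-' option): an alternative of the same cost.
-- ===== PORT A =====
-- A: collect all matching indices via enumerate, then reassemble from slices.
def remove_arg (argv : List String) (arg : String) : List String :=
  let r_idxs : List Int :=
    ((PySem.List.enumerate argv).filter (fun p => PySem.Str.startswith p.2 arg)).map (·.1)
  match r_idxs with
  | [] => argv
  | r_idx :: _ =>
    let r_next : List Int :=
      ((PySem.List.enumerate (PySem.List.slice argv (some (r_idx + 1)) none)).filter
        (fun p => PySem.Str.startswith p.2 "-")).map (·.1)
    match r_next with
    | [] => PySem.List.slice argv none (some r_idx)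
    | j :: _ =>
      PySem.List.slice argv none (some r_idx) ++ PySem.List.slice argv (some (r_idx + 1 + j)) none

-- ===== PORT B =====
-- B: one forward pass; after the first match, skip until the next '-' option.
-- inner 'for y in it: … break' loop of Source B
def removeArgSkip : List String → List String
  | [] => []
  | y :: t => if PySem.Str.startswith y "-" then y :: t else removeArgSkip t

-- outer 'for x in it' loop of Source B
def removeArgGo (arg : String) : List String → List String
  | [] => []
  | x :: rest =>
    if PySem.Str.startswith x arg then removeArgSkip rest
    else x :: removeArgGo arg rest

def remove_arg_alt (argv : List String) (arg : String) : List String :=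
  removeArgGo arg argv

-- ===== PRECONDITION & SPEC =====
def Spec_remove_arg (argv : List String) (arg : String) (out : List String) : Prop := out = remove_arg_alt argv arg
instance (argv : List String) (arg : String) (out : List String) : Decidable (Spec_remove_arg argv arg out) := by unfold Spec_remove_arg; infer_instance

-- ===== CLAIM (what is proved, stated in full; the proofs are below) =====
def Claim_equal_remove_arg : Prop := ∀ (argv : List String) (arg : String), Dom_remove_arg argv arg → Spec_remove_arg argv arg (remove_arg argv arg)

-- ===== LEMMAS AND PROOFS =====

-- first index produced by the enumerate-filter comprehension = List.findIdx?, shifted by the start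
theorem head_enum_filter (p : String → Bool) (l : List String) (s : Int) :
    ((((PySem.List.enumerate l s).filter (fun q => p q.2)).map (·.1)).head?)
      = Option.map (fun k : Nat => s + (k : Int)) (l.findIdx? p) := by
  induction l generalizing s with
  | nil => simp [PySem.List.enumerate_nil]
  | cons a l ih =>
    rw [PySem.List.enumerate_cons]
    by_cases h : p a = true
    · simp [h, List.findIdx?_cons]
    · simp only [List.filter_cons, h, Bool.false_eq_true, if_false]
      rw [ih (s + 1)]
      simp only [List.findIdx?_cons, h, Bool.false_eq_true, if_false]
      cases l.findIdx? p
      · simp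
      · simp; ring

theorem head_enum_filter_zero (p : String → Bool) (l : List String) :
    ((((PySem.List.enumerate l).filter (fun q => p q.2)).map (·.1)).head?)
      = Option.map (fun k : Nat => (k : Int)) (l.findIdx? p) := by
  rw [head_enum_filter]
  cases l.findIdx? p
  · rfl
  · simp

-- A, re-stated with findIdx? and take/drop
def removeArgChar (argv : List String) (arg : String) : List String :=
  match argv.findIdx? (fun x => PySem.Str.startswith x arg) with
  | none => argv
  | some i =>
    match (argv.drop (i + 1)).findIdx? (fun x => PySem.Str.startswith x "-") with
    | none => argv.take i
    | some j => argv.take i ++ argv.drop (i + 1 + j)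

theorem remove_arg_eq_char (argv : List String) (arg : String) :
    remove_arg argv arg = removeArgChar argv arg := by
  unfold remove_arg removeArgChar
  have h1 := head_enum_filter_zero (fun x => PySem.Str.startswith x arg) argv
  cases hf : argv.findIdx? (fun x => PySem.Str.startswith x arg) with
  | none =>
    rw [hf, Option.map_none] at h1
    rw [List.head?_eq_none_iff.mp h1]
  | some i =>
    rw [hf, Option.map_some] at h1
    obtain ⟨tail, htl⟩ := List.head?_eq_some_iff.mp h1
    rw [htl]
    simp only []
    have hdrop : PySem.List.slice argv (some ((i : Int) + 1)) none = argv.drop (i + 1) := by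
      have hc : ((i : Int) + 1) = ((i + 1 : Nat) : Int) := by push_cast; ring
      rw [hc, PySem.List.slice_from_natCast]
    rw [hdrop]
    have h2 := head_enum_filter_zero (fun x => PySem.Str.startswith x "-") (argv.drop (i + 1))
    cases hg : (argv.drop (i + 1)).findIdx? (fun x => PySem.Str.startswith x "-") with
    | none =>
      rw [hg, Option.map_none] at h2
      rw [List.head?_eq_none_iff.mp h2]
      rw [PySem.List.slice_to_natCast]
    | some j =>
      rw [hg, Option.map_some] at h2
      obtain ⟨tail2, htl2⟩ := List.head?_eq_some_iff.mp h2
      rw [htl2]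
      simp only []
      have hdrop2 : PySem.List.slice argv (some ((i : Int) + 1 + (j : Int))) none
          = argv.drop (i + 1 + j) := by
        have hc : ((i : Int) + 1 + (j : Int)) = ((i + 1 + j : Nat) : Int) := by push_cast; ring
        rw [hc, PySem.List.slice_from_natCast]
      rw [hdrop2, PySem.List.slice_to_natCast]

-- the inner skip loop agrees with "drop to the first option, or drop everything"
theorem skip_eq (rest : List String) :
    (match rest.findIdx? (fun x => PySem.Str.startswith x "-") with
     | none => ([] : List String)
     | some j => rest.drop j) = removeArgSkip rest := by
  induction rest with
  | nil => simp [removeArgSkip]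
  | cons y t ih =>
    unfold removeArgSkip
    rw [List.findIdx?_cons]
    by_cases h : PySem.Str.startswith y "-" = true
    · rw [if_pos h, if_pos h]
      simp
    · rw [if_neg h, if_neg h, ← ih]
      cases t.findIdx? (fun x => PySem.Str.startswith x "-")
      · simp
      · simp

theorem char_eq_alt (argv : List String) (arg : String) :
    removeArgChar argv arg = removeArgGo arg argv := by
  induction argv with
  | nil => rfl
  | cons x rest ih =>
    unfold removeArgChar removeArgGo
    rw [List.findIdx?_cons]
    by_cases h : PySem.Str.startswith x arg = true
    · rw [if_pos h, if_pos h]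
      simp only []
      rw [← skip_eq rest]
      simp only [List.drop_succ_cons, List.drop_zero, List.take_zero]
      cases rest.findIdx? (fun x => PySem.Str.startswith x "-")
      · rfl
      · simp [Nat.add_comm]
    · rw [if_neg h, if_neg h, ← ih]
      unfold removeArgChar
      cases hf : rest.findIdx? (fun x => PySem.Str.startswith x arg) with
      | none => simp
      | some i =>
        simp only [Option.map_some, List.drop_succ_cons, List.take_succ_cons]
        cases hg : (rest.drop (i + 1)).findIdx? (fun x => PySem.Str.startswith x "-") with
        | none => rfl
        | some j =>
          simp only []
          have : i + 1 + 1 + j = (i + 1 + j) + 1 := by omega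
          rw [this, List.drop_succ_cons]
          simp

-- ===== VERDICT (by name: the statement is the Claim_ definition above) =====
theorem remove_arg_spec : Claim_equal_remove_arg := by
  intro argv arg _
  unfold Spec_remove_arg remove_arg_alt
  rw [remove_arg_eq_char, char_eq_alt]
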